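-- pv_equiv track=rewrite | github.com/hoanganh310tp3/agv_server | web_management/Decode/buffer.py | spliceBuffer
-- ===== SOURCE A (Python) =====
-- import functools
--
-- def spliceBuffer(messageFrame, payloadBuffer):
--     bufferFrame = [0]
--     bufferData = []
--     for i in range(len(messageFrame)):
--         sliced = messageFrame[0 : i+1]
--         sum = functools.reduce(lambda a, b: a+b, sliced, 0)
--         bufferFrame.append(sum)
--
--     subBuffer = []
--     for i in range(len(bufferFrame)-1):
--         subBuffer = payloadBuffer[bufferFrame[i] : bufferFrame[i+1]]
--         bufferData.append(subBuffer)
--     return bufferData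
-- ===== SOURCE B (Python) =====
-- def spliceBuffer(messageFrame, payloadBuffer):
--     chunks = []
--     offset = 0
--     for m in messageFrame:
--         chunks.append(payloadBuffer[offset : offset + m])
--         offset += m
--     return chunks
-- ===== Notes on version B (the rewrite author's own statement) =====
-- stated objective: faster
-- what changed: B keeps one running offset and slices in a single pass, instead of re-reducing every prefix of messageFrame to build a boundary list and then slicing in a second loop.
import Mathlib
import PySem

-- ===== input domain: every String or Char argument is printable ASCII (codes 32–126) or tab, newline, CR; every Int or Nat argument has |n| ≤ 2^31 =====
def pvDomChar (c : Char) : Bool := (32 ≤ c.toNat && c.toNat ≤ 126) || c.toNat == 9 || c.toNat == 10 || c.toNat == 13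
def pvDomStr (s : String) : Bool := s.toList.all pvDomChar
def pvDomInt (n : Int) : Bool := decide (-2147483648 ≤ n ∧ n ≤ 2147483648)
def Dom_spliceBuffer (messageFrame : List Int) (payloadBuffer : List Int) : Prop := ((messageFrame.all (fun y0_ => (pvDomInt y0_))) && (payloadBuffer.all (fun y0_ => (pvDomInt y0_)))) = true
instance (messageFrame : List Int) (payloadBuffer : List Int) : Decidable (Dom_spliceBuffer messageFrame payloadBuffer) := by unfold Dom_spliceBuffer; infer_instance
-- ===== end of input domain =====

-- B replaces A's quadratic prefix-reduction + second slicing loop by a single pass with a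
-- running offset (objective: faster, as measured).

-- ===== PORT A =====
def spliceBuffer (messageFrame : List Int) (payloadBuffer : List Int) : List (List Int) :=
  -- bufferFrame = [0]; for i in range(len(messageFrame)): bufferFrame.append(reduce(+, messageFrame[0:i+1], 0))
  let bufferFrame : List Int :=
    (PySem.List.pyRange 0 (messageFrame.length : Int) 1).foldl
      (fun bf i =>
        bf ++ [(PySem.List.slice messageFrame (some 0) (some (i + 1))).foldl (fun a b => a + b) 0])
      [0]
  -- for i in range(len(bufferFrame)-1): bufferData.append(payloadBuffer[bufferFrame[i]:bufferFrame[i+1]])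
  (PySem.List.pyRange 0 ((bufferFrame.length : Int) - 1) 1).foldl
    (fun bd i =>
      bd ++ [PySem.List.slice payloadBuffer
               (some (PySem.List.pyGetD bufferFrame i 0))
               (some (PySem.List.pyGetD bufferFrame (i + 1) 0))])
    []

-- ===== PORT B =====
def spliceBuffer_alt (messageFrame : List Int) (payloadBuffer : List Int) : List (List Int) :=
  (messageFrame.foldl
    (fun (st : List (List Int) × Int) m =>
      (st.1 ++ [PySem.List.slice payloadBuffer (some st.2) (some (st.2 + m))], st.2 + m))
    ([], 0)).1

-- ===== PRECONDITION & SPEC =====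
def Spec_spliceBuffer (messageFrame : List Int) (payloadBuffer : List Int) (out : List (List Int)) : Prop := out = spliceBuffer_alt messageFrame payloadBuffer
instance (messageFrame : List Int) (payloadBuffer : List Int) (out : List (List Int)) : Decidable (Spec_spliceBuffer messageFrame payloadBuffer out) := by unfold Spec_spliceBuffer; infer_instance

-- ===== CLAIM (what is proved, stated in full; the proofs are below) =====
def Claim_equal_spliceBuffer : Prop := ∀ (messageFrame : List Int) (payloadBuffer : List Int), Dom_spliceBuffer messageFrame payloadBuffer → Spec_spliceBuffer messageFrame payloadBuffer (spliceBuffer messageFrame payloadBuffer)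

-- ===== LEMMAS AND PROOFS =====

/-- Prefix sum of the first `k` elements, as A computes it. -/
def pvPfx (mf : List Int) (k : Nat) : Int := (mf.take k).foldl (fun a b => a + b) 0

/-- The common shape: successive chunks of `pb` cut at the running offsets. -/
def pvGo (pb : List Int) : List Int → Int → List (List Int)
  | [], _ => []
  | m :: t, c => PySem.List.slice pb (some c) (some (c + m)) :: pvGo pb t (c + m)

theorem pvPfx_succ (m : Int) (t : List Int) (k : Nat) :
    pvPfx (m :: t) (k + 1) = m + pvPfx t k := by
  simp only [pvPfx, List.take_succ_cons, List.foldl_cons, zero_add]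
  rw [PySem.List.foldl_add _ (fun x => x) m, PySem.List.foldl_add _ (fun x => x) 0]
  ring

theorem pvGo_eq_map (pb : List Int) (mf : List Int) (c : Int) :
    pvGo pb mf c =
      (List.range mf.length).map
        (fun k => PySem.List.slice pb (some (c + pvPfx mf k)) (some (c + pvPfx mf (k + 1)))) := by
  induction mf generalizing c with
  | nil => simp [pvGo]
  | cons m t ih =>
    simp only [pvGo, List.length_cons, List.range_succ_eq_map, List.map_cons, List.map_map]
    congr 1
    · simp [pvPfx]
    · rw [ih (c + m)]
      refine List.map_congr_left (fun k _ => ?_)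
      simp only [Function.comp, Nat.succ_eq_add_one, pvPfx_succ]
      ring_nf

theorem pvAlt_eq_go (pb : List Int) (mf : List Int) (acc : List (List Int)) (c : Int) :
    (mf.foldl
      (fun (st : List (List Int) × Int) m =>
        (st.1 ++ [PySem.List.slice pb (some st.2) (some (st.2 + m))], st.2 + m))
      (acc, c)).1 = acc ++ pvGo pb mf c := by
  induction mf generalizing acc c with
  | nil => simp [pvGo]
  | cons m t ih => simp [pvGo, List.foldl_cons, ih]

/-- A's bufferFrame is the list of prefix sums `pvPfx mf 0, …, pvPfx mf n`. -/
theorem pvBufferFrame_eq (mf : List Int) :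
    ((PySem.List.pyRange 0 (mf.length : Int) 1).foldl
      (fun bf i =>
        bf ++ [(PySem.List.slice mf (some 0) (some (i + 1))).foldl (fun a b => a + b) 0])
      [0]) = (List.range (mf.length + 1)).map (fun k => pvPfx mf k) := by
  rw [PySem.List.foldl_append_singleton_eq_map, PySem.List.pyRange_one]
  simp only [sub_zero, Int.toNat_natCast, List.map_map]
  rw [List.range_succ_eq_map]
  simp only [List.map_cons, List.map_map, List.singleton_append]
  congr 1
  refine List.map_congr_left (fun a _ => ?_)
  simp only [Function.comp, Nat.succ_eq_add_one]
  have h : ((0 : Int) + (a : Int)) + 1 = ((a + 1 : Nat) : Int) := by push_cast; ring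
  rw [h, PySem.List.slice_zero_start, PySem.List.slice_to_natCast]
  rfl

theorem pvGetD_prefix_map (mf : List Int) (k : Nat) (hk : k ≤ mf.length) :
    PySem.List.pyGetD ((List.range (mf.length + 1)).map (fun j => pvPfx mf j)) (k : Int) 0
      = pvPfx mf k := by
  rw [PySem.List.pyGetD_eq_getElem _ 0 (by positivity) (by simp; omega)]
  simp

-- ===== VERDICT (by name: the statement is the Claim_ definition above) =====
theorem spliceBuffer_spec : Claim_equal_spliceBuffer := by
  intro mf pb _
  show spliceBuffer mf pb = spliceBuffer_alt mf pb
  unfold spliceBuffer spliceBuffer_alt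
  rw [pvAlt_eq_go, pvGo_eq_map]
  simp only [pvBufferFrame_eq mf, List.nil_append]
  rw [PySem.List.foldl_append_singleton_eq_map, PySem.List.pyRange_one]
  have hlen : (((List.range (mf.length + 1)).map (fun k => pvPfx mf k)).length : Int) - 1 - 0
      = (mf.length : Int) := by simp
  rw [hlen]
  simp only [Int.toNat_natCast, List.map_map, List.nil_append]
  refine List.map_congr_left (fun k hk => ?_)
  have hk' : k < mf.length := List.mem_range.mp hk
  simp only [Function.comp, zero_add]
  have h1 : PySem.List.pyGetD ((List.range (mf.length + 1)).map (fun j => pvPfx mf j)) (k : Int) 0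
      = pvPfx mf k := pvGetD_prefix_map mf k (le_of_lt hk')
  have h2 : ((k : Int) + 1) = ((k + 1 : Nat) : Int) := by push_cast; ring
  rw [h1, h2, pvGetD_prefix_map mf (k + 1) (by omega)]
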